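-- pv_equiv track=rewrite | github.com/f220b/LeetCode-POTD | 4229-TrimTrailingVowels/4229-TrimTrailingVowels.py | trimTrailingVowels
-- ===== SOURCE A (Python) =====
-- def trimTrailingVowels(s: str) -> str:
--     n = len(s)
--     found_non_vowels = False
--     vowels = ["a", "e", "i", "o", "u"]
--     for i in range(n - 1, -1, -1):
--         if s[i] not in vowels:
--             found_non_vowels = True
--             break
--     if not found_non_vowels:
--         return ""
--     return s[: i + 1]
-- ===== SOURCE B (Python) =====
-- def trimTrailingVowels(s: str) -> str:
--     # single forward pass: remember the index of the last non-vowel seen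
--     last = -1
--     for i, c in enumerate(s):
--         if c not in "aeiou":
--             last = i
--     return s[:last + 1]
-- ===== Notes on version B (the rewrite author's own statement) =====
-- stated objective: alternative
-- what changed: Replaced the backward early-exit search (scan from the end, break at the first non-vowel, with a found flag) by a single forward pass that maintains a running last-non-vowel index and slices once at the end.
import Mathlib
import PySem

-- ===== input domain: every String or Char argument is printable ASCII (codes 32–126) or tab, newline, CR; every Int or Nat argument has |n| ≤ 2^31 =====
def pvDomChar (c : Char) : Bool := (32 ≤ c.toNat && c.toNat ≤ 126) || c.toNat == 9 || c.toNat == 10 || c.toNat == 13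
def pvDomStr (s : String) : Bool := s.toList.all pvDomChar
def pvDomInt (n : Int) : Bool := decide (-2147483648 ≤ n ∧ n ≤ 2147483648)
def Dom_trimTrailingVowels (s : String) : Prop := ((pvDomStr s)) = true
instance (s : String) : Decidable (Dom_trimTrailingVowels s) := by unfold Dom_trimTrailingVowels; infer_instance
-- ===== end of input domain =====

-- B replaces A's backward early-exit search by a single forward pass keeping a running last-non-vowel index (alternative decomposition, same cost).


-- ===== PORT A =====
-- A: scan indices n-1 .. 0, break at the first non-vowel (the break-with-flag loop is find? over the countdown range); "" if none.
def trimTrailingVowels (s : String) : String :=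
  let n : Int := PySem.Str.len s
  let vowels : List Char := ['a', 'e', 'i', 'o', 'u']
  match (PySem.List.pyRange (n - 1) (-1) (-1)).find?
      (fun i => !(vowels.contains (PySem.List.pyGetD s.toList i ' '))) with
  | none => ""
  | some i => PySem.Str.slice s none (some (i + 1))

-- ===== PORT B =====
-- B: forward pass over enumerate(s), running last-non-vowel index, one slice at the end.
def trimTrailingVowels_alt (s : String) : String :=
  let last : Int := (PySem.List.enumerate s.toList 0).foldl
      (fun last p => if !(['a', 'e', 'i', 'o', 'u'].contains p.2) then p.1 else last) (-1)
  PySem.Str.slice s none (some (last + 1))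

-- ===== PRECONDITION & SPEC =====
def Spec_trimTrailingVowels (s : String) (out : String) : Prop := out = trimTrailingVowels_alt s
instance (s : String) (out : String) : Decidable (Spec_trimTrailingVowels s out) := by unfold Spec_trimTrailingVowels; infer_instance

-- ===== CLAIM (what is proved, stated in full; the proofs are below) =====
def Claim_equal_trimTrailingVowels : Prop := ∀ (s : String), Dom_trimTrailingVowels s → Spec_trimTrailingVowels s (trimTrailingVowels s)

-- ===== LEMMAS AND PROOFS =====

theorem find?_congr_mem {α : Type} {l : List α} {p q : α → Bool}
    (h : ∀ x ∈ l, p x = q x) : l.find? p = l.find? q := by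
  induction l with
  | nil => rfl
  | cons x t ih =>
    simp only [List.find?]
    rw [h x (List.mem_cons_self)]
    cases q x
    · exact ih (fun y hy => h y (List.mem_cons_of_mem _ hy))
    · rfl

-- A's backward search and B's forward fold compute the same index (as Option vs -1-sentinel).
theorem backward_eq_forward (cs : List Char) :
    (PySem.List.pyRange ((cs.length : Int) - 1) (-1) (-1)).find?
        (fun i => !(['a', 'e', 'i', 'o', 'u'].contains (PySem.List.pyGetD cs i ' '))) =
      (if ((PySem.List.enumerate cs 0).foldl
          (fun last p => if !(['a', 'e', 'i', 'o', 'u'].contains p.2) then p.1 else last) (-1)) = -1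
       then none
       else some ((PySem.List.enumerate cs 0).foldl
          (fun last p => if !(['a', 'e', 'i', 'o', 'u'].contains p.2) then p.1 else last) (-1))) := by
  induction cs using List.reverseRecOn with
  | nil => simp [PySem.List.pyRange_neg_one_eq_nil, PySem.List.enumerate_nil]
  | append_singleton cs c ih =>
    have hlen : ((cs ++ [c]).length : Int) - 1 = (cs.length : Int) := by simp
    rw [hlen, PySem.List.pyRange_neg_one_cons (by omega : (-1 : Int) < (cs.length : Int))]
    have hget : PySem.List.pyGetD (cs ++ [c]) (cs.length : Int) ' ' = c := by simp
    have hfold : (PySem.List.enumerate (cs ++ [c]) 0).foldl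
        (fun last p => if !(['a', 'e', 'i', 'o', 'u'].contains p.2) then p.1 else last) (-1) =
        (if !(['a', 'e', 'i', 'o', 'u'].contains c)
         then (cs.length : Int)
         else (PySem.List.enumerate cs 0).foldl
            (fun last p => if !(['a', 'e', 'i', 'o', 'u'].contains p.2) then p.1 else last) (-1)) := by
      rw [PySem.List.enumerate_append, List.foldl_append]
      simp [PySem.List.enumerate_cons, PySem.List.enumerate_nil]
    rw [hfold]
    cases hv : !(['a', 'e', 'i', 'o', 'u'].contains c)
    · -- c is a vowel: the head test fails, A keeps scanning; B keeps its accumulator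
      rw [List.find?_cons_of_neg (h := by rw [hget, hv]; simp)]
      rw [find?_congr_mem (q := fun i => !(['a', 'e', 'i', 'o', 'u'].contains (PySem.List.pyGetD cs i ' ')))
          (by
            intro i hi
            rw [PySem.List.mem_pyRange_neg_one] at hi
            show (!(['a', 'e', 'i', 'o', 'u'].contains (PySem.List.pyGetD (cs ++ [c]) i ' '))) =
              (!(['a', 'e', 'i', 'o', 'u'].contains (PySem.List.pyGetD cs i ' ')))
            rw [PySem.List.pyGetD_eq_getElem (cs ++ [c]) ' ' (by omega) (by simp; omega),
                PySem.List.pyGetD_eq_getElem cs ' ' (by omega) (by omega),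
                List.getElem_append_left (by omega)])]
      simpa using ih
    · -- c is not a vowel: A breaks at index len(cs); B's accumulator ends at len(cs)
      rw [List.find?_cons_of_pos (h := by rw [hget]; exact hv)]
      rw [if_pos rfl, if_neg (by omega : ¬((cs.length : Int) = -1))]

-- ===== VERDICT (by name: the statement is the Claim_ definition above) =====
theorem trimTrailingVowels_spec : Claim_equal_trimTrailingVowels := by
  intro s _
  unfold Spec_trimTrailingVowels trimTrailingVowels trimTrailingVowels_alt
  simp only [PySem.Str.len_eq]
  rw [backward_eq_forward s.toList]
  by_cases h : ((PySem.List.enumerate s.toList 0).foldl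
      (fun last p => if !(['a', 'e', 'i', 'o', 'u'].contains p.2) then p.1 else last) (-1)) = -1
  · rw [if_pos h, h]
    norm_num
    simp [PySem.Str.slice, PySem.List.slice_to s.toList (le_refl (0 : Int))]
  · rw [if_neg h]
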